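-- pv_equiv track=rewrite | github.com/GitMonsters/octotetrahedral-agi | arc-puzzle-catalog/solves/12687fe0/solver.py | transform
-- ===== SOURCE A (Python) =====
-- from collections import Counter
--
-- def transform(grid: list[list[int]]) -> list[list[int]]:
--     H = len(grid)
--     W = len(grid[0])
--
--     # Separator = most common color overall
--     flat = [c for row in grid for c in row]
--     sep = Counter(flat).most_common(1)[0][0]
--
--     # Find full separator rows and columns
--     sep_rows = [r for r in range(H) if all(grid[r][c] == sep for c in range(W))]
--     sep_cols = [c for c in range(W) if all(grid[r][c] == sep for r in range(H))]
--
--     # Extract row bands (ranges between separator rows)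
--     row_bands = []
--     prev = 0
--     for sr in sep_rows:
--         if sr > prev:
--             row_bands.append((prev, sr - 1))
--         prev = sr + 1
--     if prev < H:
--         row_bands.append((prev, H - 1))
--
--     # Extract column bands (ranges between separator columns)
--     col_bands = []
--     prev = 0
--     for sc in sep_cols:
--         if sc > prev:
--             col_bands.append((prev, sc - 1))
--         prev = sc + 1
--     if prev < W:
--         col_bands.append((prev, W - 1))
--
--     # Build output: one cell per panel
--     output = []
--     for r0, r1 in row_bands:
--         row = []
--         for c0, c1 in col_bands:
--             # Collect non-separator colors in this panel
--             colors = []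
--             for r in range(r0, r1 + 1):
--                 for c in range(c0, c1 + 1):
--                     if grid[r][c] != sep:
--                         colors.append(grid[r][c])
--             if colors:
--                 row.append(Counter(colors).most_common(1)[0][0])
--             else:
--                 row.append(sep)
--         output.append(row)
--
--     return output
-- ===== SOURCE B (Python) =====
-- from collections import Counter
--
--
-- def transform(grid: list[list[int]]) -> list[list[int]]:
--     H = len(grid)
--     W = len(grid[0])
--
--     # Separator = most common color overall
--     sep = Counter([c for row in grid for c in row]).most_common(1)[0][0]
--
--     def band_index(n, is_sep):
--         # lookup table: idx[i] = index of the band containing line i (None on separator lines)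
--         idx = []
--         bands = 0
--         in_band = False
--         for i in range(n):
--             if is_sep(i):
--                 in_band = False
--                 idx.append(None)
--             else:
--                 if not in_band:
--                     bands += 1
--                     in_band = True
--                 idx.append(bands - 1)
--         return idx, bands
--
--     row_of, nR = band_index(H, lambda r: all(grid[r][c] == sep for c in range(W)))
--     col_of, nC = band_index(W, lambda c: all(grid[r][c] == sep for r in range(H)))
--
--     # One row-major pass: bucket every non-separator cell into its panel
--     panels = {}
--     for r in range(H):
--         if row_of[r] is None:
--             continue
--         for c in range(W):
--             if col_of[c] is not None and grid[r][c] != sep: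
--                 panels.setdefault((row_of[r], col_of[c]), []).append(grid[r][c])
--
--     return [[Counter(panels[(i, j)]).most_common(1)[0][0] if (i, j) in panels else sep
--              for j in range(nC)]
--             for i in range(nR)]
-- ===== Notes on version B (the rewrite author's own statement) =====
-- stated objective: alternative
-- what changed: Instead of cutting the grid into (start,end) band ranges and re-scanning each panel's rectangle with nested loops, B builds per-line band-index lookup tables (row_of/col_of), makes ONE row-major pass over the whole grid bucketing every non-separator cell into a dict keyed by its (row-band, col-band) panel, and finally emits each panel's most common bucketed color (or sep for an empty bucket).
import Mathlib
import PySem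

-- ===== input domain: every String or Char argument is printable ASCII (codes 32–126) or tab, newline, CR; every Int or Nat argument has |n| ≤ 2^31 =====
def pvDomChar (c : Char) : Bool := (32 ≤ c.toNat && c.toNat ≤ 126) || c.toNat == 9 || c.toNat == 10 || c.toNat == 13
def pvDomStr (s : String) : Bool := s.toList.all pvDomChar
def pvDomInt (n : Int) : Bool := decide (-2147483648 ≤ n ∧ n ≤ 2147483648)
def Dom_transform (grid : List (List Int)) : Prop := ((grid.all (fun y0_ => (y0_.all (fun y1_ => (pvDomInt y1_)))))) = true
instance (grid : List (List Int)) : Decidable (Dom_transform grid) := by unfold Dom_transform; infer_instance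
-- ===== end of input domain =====

-- B replaces A's (start,end) band ranges and per-panel rectangle re-scans by per-line
-- band-index lookup tables plus ONE row-major pass that buckets every non-separator cell
-- into a dict keyed by its (row-band, col-band) panel (objective: alternative decomposition,
-- same asymptotic cost).

-- ===== PORT A =====
-- Counter(xs).most_common(1)[0][0] is the first item with maximal count in insertion order
-- (heapq.nlargest = stable descending sort); ported as PySem.List.max? (first extremal)
-- over the counter's items. All indices are Python ints that stay nonnegative here, ported
-- as Nat; range(a, b) with a ≤ b is List.range' a (b - a); grid[r] / row[c] are in range
-- on Pre_transform and are ported as getD.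
def transform (grid : List (List Int)) : List (List Int) :=
  let H := grid.length
  let W := (grid.headD []).length       -- len(grid[0]); an empty grid raises IndexError: outside Pre_transform
  let flat := grid.flatMap (fun row => row)
  match PySem.List.max? (PySem.Dict.counter flat).items (fun p => p.2) with
  | none => []                          -- most_common of an empty Counter raises IndexError: outside Pre_transform
  | some sp =>
    let sep := sp.1
    let sepRows := (List.range H).filter (fun r => (List.range W).all (fun c => (grid.getD r []).getD c 0 == sep))
    let sepCols := (List.range W).filter (fun c => (List.range H).all (fun r => (grid.getD r []).getD c 0 == sep))
    let stR := sepRows.foldl (fun (s : List (Nat × Nat) × Nat) sr =>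
        (if s.2 < sr then s.1 ++ [(s.2, sr - 1)] else s.1, sr + 1)) ([], 0)
    let rowBands := if stR.2 < H then stR.1 ++ [(stR.2, H - 1)] else stR.1
    let stC := sepCols.foldl (fun (s : List (Nat × Nat) × Nat) sc =>
        (if s.2 < sc then s.1 ++ [(s.2, sc - 1)] else s.1, sc + 1)) ([], 0)
    let colBands := if stC.2 < W then stC.1 ++ [(stC.2, W - 1)] else stC.1
    rowBands.foldl (fun output rb =>
      output ++ [colBands.foldl (fun row cb =>
        let colors := (List.range' rb.1 (rb.2 + 1 - rb.1)).foldl (fun cs r =>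
            (List.range' cb.1 (cb.2 + 1 - cb.1)).foldl (fun cs c =>
              if (grid.getD r []).getD c 0 != sep then cs ++ [(grid.getD r []).getD c 0] else cs) cs) []
        if colors ≠ [] then
          row ++ [match PySem.List.max? (PySem.Dict.counter colors).items (fun p => p.2) with
                  | some p => p.1
                  | none => sep]        -- unreachable: colors ≠ []
        else row ++ [sep]) []]) []

-- ===== PORT B =====
-- band_index(n, is_sep): lookup table built by one scan; idx entries appended in order
-- i = 0..n-1, so the list-assignment idx[i] = … is an append. State = (idx, bands, in_band).
def bandIndexB (n : Nat) (isSep : Nat → Bool) : List (Option Nat) × Nat :=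
  let st := (List.range n).foldl
    (fun (s : List (Option Nat) × Nat × Bool) i =>
      if isSep i then (s.1 ++ [none], s.2.1, false)
      else if s.2.2 then (s.1 ++ [some (s.2.1 - 1)], s.2.1, true)
      else (s.1 ++ [some s.2.1], s.2.1 + 1, true))
    ([], 0, false)
  (st.1, st.2.1)

-- panels.setdefault(key, []).append(v) is PySem.Dict.modify key [] (· ++ [v]);
-- '(i, j) in panels' is Dict.contains, and panels[(i, j)] under that check is getD _ [].
def transform_alt (grid : List (List Int)) : List (List Int) :=
  let H := grid.length
  let W := (grid.headD []).length       -- len(grid[0]); empty grid raises: outside Pre_transform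
  match PySem.List.max? (PySem.Dict.counter (grid.flatMap (fun row => row))).items (fun p => p.2) with
  | none => []                          -- most_common on an empty Counter raises: outside Pre_transform
  | some sp =>
    let sep := sp.1
    let rc := bandIndexB H (fun r => (List.range W).all (fun c => (grid.getD r []).getD c 0 == sep))
    let cc := bandIndexB W (fun c => (List.range H).all (fun r => (grid.getD r []).getD c 0 == sep))
    let panels : PySem.Dict (Nat × Nat) (List Int) := (List.range H).foldl (fun d r =>
      match rc.1.getD r none with
      | none => d
      | some i => (List.range W).foldl (fun d c =>
          match cc.1.getD c none with
          | some j => if (grid.getD r []).getD c 0 != sep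
                      then d.modify (i, j) [] (fun l => l ++ [(grid.getD r []).getD c 0])
                      else d
          | none => d) d) PySem.Dict.empty
    (List.range rc.2).map (fun i => (List.range cc.2).map (fun j =>
      if panels.contains (i, j) then
        match PySem.List.max? (PySem.Dict.counter (panels.getD (i, j) [])).items (fun p => p.2) with
        | some p => p.1
        | none => sep                   -- unreachable: every bucketed list is nonempty
      else sep))

-- ===== PRECONDITION & SPEC =====
-- Pre_transform is exactly where the Python A returns: a nonempty grid with at least one
-- nonempty row (else taking the most common of no cells, or the first row, raises IndexError) in which no
-- row is shorter than the first (else grid[r][c] raises IndexError for c < W).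
def Pre_transform (grid : List (List Int)) : Prop :=
  grid ≠ [] ∧ (∃ row ∈ grid, row ≠ []) ∧ ∀ row ∈ grid, (grid.headD []).length ≤ row.length
instance (grid : List (List Int)) : Decidable (Pre_transform grid) := by unfold Pre_transform; infer_instance
def pvWitness_transform : List (List Int) := [[1, 2], [1, 1]]

def Spec_transform (grid : List (List Int)) (out : List (List Int)) : Prop := out = transform_alt grid
instance (grid : List (List Int)) (out : List (List Int)) : Decidable (Spec_transform grid out) := by unfold Spec_transform; infer_instance

-- ===== CLAIM (what is proved, stated in full; the proofs are below) =====
def Claim_equal_transform : Prop := ∀ (grid : List (List Int)), Dom_transform grid → Pre_transform grid → Spec_transform grid (transform grid)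

-- ===== LEMMAS AND PROOFS =====

theorem pv_filterMap_ite {α β : Type} (l : List α) (p : α → Bool) (f : α → β) :
    l.filterMap (fun a => if p a then some (f a) else none) = (l.filter p).map f := by
  induction l with
  | nil => rfl
  | cons x t ih =>
    by_cases h' : p x <;> simp [h', ih]

theorem pv_getD_append_lt {α : Type} (l : List α) (x d : α) {i : Nat} (h : i < l.length) :
    (l ++ [x]).getD i d = l.getD i d := by
  rw [List.getD_eq_getElem?_getD, List.getD_eq_getElem?_getD, List.getElem?_append_left h]

theorem pv_getD_append_self {α : Type} (l : List α) (x d : α) :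
    (l ++ [x]).getD l.length d = x := by
  rw [List.getD_eq_getElem?_getD, List.getElem?_append_right (Nat.le_refl _)]
  simp

-- helper used to state the band invariant
def pvBandFilt (idx : List (Option Nat)) (k b : Nat) : List Nat :=
  (List.range k).filter (fun i => idx.getD i none == some b)

theorem pv_bandFilt_snoc (idx : List (Option Nat)) (x : Option Nat) (b : Nat)
    (h : idx.length = k) :
    pvBandFilt (idx ++ [x]) (k + 1) b
      = pvBandFilt idx k b ++ (if x == some b then [k] else []) := by
  unfold pvBandFilt
  rw [List.range_succ, List.filter_append]
  congr 1
  · apply List.filter_congr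
    intro i hi
    rw [pv_getD_append_lt idx x none (by rw [h]; exact List.mem_range.1 hi)]
  · subst h
    rw [List.filter_singleton]
    rw [show ((idx ++ [x]).getD idx.length none == some b) = (x == some b) by
      rw [pv_getD_append_self]]
    cases x <;> simp

-- helper: the b-th band's index range
def pvBandRange (bs : List (Nat × Nat)) (b : Nat) : List Nat :=
  List.range' ((bs.getD b (0,0)).1) ((bs.getD b (0,0)).2 + 1 - (bs.getD b (0,0)).1)

-- joint invariant of A's band fold state (bs, prev) and B's scan state (idx, inB):
-- indices mapped to band b by the lookup table = the b-th closed band's range,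
-- or the open band's range so far for b = bs.length.
def pvInvariant (idx : List (Option Nat)) (k : Nat) (bs : List (Nat × Nat)) (prev : Nat) (inB : Bool) : Prop :=
  ∀ b, pvBandFilt idx k b =
    if b < bs.length then pvBandRange bs b
    else if inB = true ∧ b = bs.length then List.range' prev (k - prev) else []

theorem pv_inv_close (idx : List (Option Nat)) (k : Nat) (bs : List (Nat × Nat)) (prev prev' : Nat)
    (hpv : prev < k) (h : pvInvariant idx k bs prev true) :
    pvInvariant idx k (bs ++ [(prev, k - 1)]) prev' false := by
  intro b
  have hb := h b
  rcases Nat.lt_trichotomy b bs.length with hlt | heq | hgt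
  · rw [if_pos hlt] at hb
    rw [hb, if_pos (by simp; omega)]
    unfold pvBandRange
    rw [pv_getD_append_lt bs (prev, k - 1) (0,0) hlt]
  · subst heq
    rw [if_neg (by omega), if_pos (by simp)] at hb
    rw [hb, if_pos (by simp)]
    unfold pvBandRange
    rw [pv_getD_append_self]
    have h2 : k - 1 + 1 = k := by omega
    rw [h2]
  · rw [if_neg (by omega), if_neg (by simp; omega)] at hb
    rw [hb, if_neg (by simp; omega), if_neg (by simp)]

theorem pv_inv_sep (idx : List (Option Nat)) (k : Nat) (bs : List (Nat × Nat)) (prev prev' : Nat)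
    (hlen : idx.length = k) (h : pvInvariant idx k bs prev false) :
    pvInvariant (idx ++ [none]) (k + 1) bs prev' false := by
  intro b
  rw [pv_bandFilt_snoc idx none b hlen]
  have hnone : (if ((none : Option Nat) == some b) = true then [k] else []) = ([] : List Nat) := by
    simp
  rw [hnone, List.append_nil, h b]
  simp

theorem pv_inv_extend (idx : List (Option Nat)) (k : Nat) (bs : List (Nat × Nat)) (prev : Nat)
    (hlen : idx.length = k) (hpv : prev ≤ k) (h : pvInvariant idx k bs prev true) :
    pvInvariant (idx ++ [some bs.length]) (k + 1) bs prev true := by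
  intro b
  rw [pv_bandFilt_snoc idx (some bs.length) b hlen]
  have hb := h b
  by_cases hbe : b = bs.length
  · subst hbe
    rw [if_pos (by simp)]
    rw [if_neg (by omega), if_pos (by simp)] at hb
    rw [hb, if_neg (by omega), if_pos (by simp)]
    rw [show k + 1 - prev = (k - prev) + 1 by omega, List.range'_1_concat,
        show prev + (k - prev) = k by omega]
  · rw [if_neg (by simp; omega), List.append_nil, hb]
    by_cases hlt : b < bs.length
    · rw [if_pos hlt, if_pos hlt]
    · rw [if_neg hlt, if_neg hlt]
      simp [hbe]

theorem pv_inv_open (idx : List (Option Nat)) (k : Nat) (bs : List (Nat × Nat)) (prev : Nat)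
    (hlen : idx.length = k) (h : pvInvariant idx k bs prev false) :
    pvInvariant (idx ++ [some bs.length]) (k + 1) bs k true := by
  intro b
  rw [pv_bandFilt_snoc idx (some bs.length) b hlen]
  have hb := h b
  by_cases hbe : b = bs.length
  · subst hbe
    rw [if_pos (by simp)]
    rw [if_neg (by omega), if_neg (by simp)] at hb
    rw [hb, if_neg (by omega), if_pos (by simp)]
    simp
  · rw [if_neg (by simp; omega), List.append_nil, hb]
    by_cases hlt : b < bs.length
    · rw [if_pos hlt, if_pos hlt]
    · rw [if_neg hlt, if_neg hlt]
      simp [hbe]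

-- Joint induction over indices k..k+m-1: B's counter ends at the band count and
-- the lookup table classifies indices exactly by A's final band list.
theorem pv_band_aux (p : Nat → Bool) :
    ∀ (m k : Nat) (bs : List (Nat × Nat)) (prev : Nat) (idx : List (Option Nat)) (inB : Bool),
    idx.length = k →
    (if inB then prev < k else prev = k) →
    pvInvariant idx k bs prev inB →
    (let stA := ((List.range' k m).filter p).foldl (fun (s : List (Nat × Nat) × Nat) sr =>
        (if s.2 < sr then s.1 ++ [(s.2, sr - 1)] else s.1, sr + 1)) (bs, prev)
     let bsF := if stA.2 < k + m then stA.1 ++ [(stA.2, k + m - 1)] else stA.1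
     let stB := (List.range' k m).foldl
        (fun (s : List (Option Nat) × Nat × Bool) i =>
          if p i then (s.1 ++ [none], s.2.1, false)
          else if s.2.2 then (s.1 ++ [some (s.2.1 - 1)], s.2.1, true)
          else (s.1 ++ [some s.2.1], s.2.1 + 1, true))
        (idx, bs.length + (if inB then 1 else 0), inB)
     stB.2.1 = bsF.length ∧
     ∀ b, pvBandFilt stB.1 (k + m) b = if b < bsF.length then pvBandRange bsF b else []) := by
  intro m
  induction m with
  | zero =>
    intro k bs prev idx inB hlen hprev hinv
    simp only [List.range'_zero, List.filter_nil, List.foldl_nil, Nat.add_zero]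
    cases inB with
    | false =>
      have hpk : prev = k := by simpa using hprev
      simp only [if_neg (show ¬ prev < k by omega)]
      refine ⟨by simp, ?_⟩
      intro b
      have hb := hinv b
      rcases Nat.lt_or_ge b bs.length with hlt | hge
      · rw [if_pos hlt] at hb ⊢; exact hb
      · rw [if_neg (by omega), if_neg (by simp)] at hb
        rw [hb, if_neg (by omega)]
    | true =>
      have hpk : prev < k := by simpa using hprev
      simp only [if_pos hpk]
      refine ⟨by simp, ?_⟩
      intro b
      have hb := pv_inv_close idx k bs prev 0 hpk hinv b
      rcases Nat.lt_or_ge b (bs ++ [(prev, k - 1)]).length with hlt | hge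
      · rw [if_pos hlt] at hb ⊢; exact hb
      · rw [if_neg (by omega), if_neg (by simp)] at hb
        rw [hb, if_neg (by omega)]
  | succ m ih =>
    intro k bs prev idx inB hlen hprev hinv
    rw [List.range'_succ]
    have harith : k + 1 + m = k + (m + 1) := by omega
    cases hpk : p k with
    | true =>
      simp only [List.filter_cons, hpk, if_pos, List.foldl_cons]
      cases inB with
      | true =>
        have hpv : prev < k := by simpa using hprev
        simp only [if_pos hpv]
        have hres := ih (k + 1) (bs ++ [(prev, k - 1)]) (k + 1) (idx ++ [none]) false
          (by simp [hlen]) (by simp)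
          (pv_inv_sep idx k (bs ++ [(prev, k - 1)]) (k + 1) (k + 1) hlen
            (pv_inv_close idx k bs prev (k + 1) hpv hinv))
        rw [harith] at hres
        simpa using hres
      | false =>
        have hpv : prev = k := by simpa using hprev
        subst hpv
        simp only [if_neg (show ¬ prev < prev by omega), Bool.false_eq_true, if_neg (show ¬ False by simp)]
        have hres := ih (prev + 1) bs (prev + 1) (idx ++ [none]) false
          (by simp [hlen]) (by simp)
          (pv_inv_sep idx prev bs prev (prev + 1) hlen hinv)
        rw [show prev + 1 + m = prev + (m + 1) by omega] at hres
        simpa using hres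
    | false =>
      simp only [List.filter_cons, hpk, Bool.false_eq_true, if_neg (show ¬ False by simp), List.foldl_cons]
      cases inB with
      | true =>
        have hpv : prev < k := by simpa using hprev
        simp only [if_true]
        have hres := ih (k + 1) bs prev (idx ++ [some (bs.length + 1 - 1)]) true
          (by simp [hlen]) (by simp; omega)
          (by
            have := pv_inv_extend idx k bs prev hlen (by omega) hinv
            simpa using this)
        rw [harith] at hres
        simpa using hres
      | false =>
        have hpv : prev = k := by simpa using hprev
        subst hpv
        simp only [Bool.false_eq_true, if_neg (show ¬ False by simp)]
        have hres := ih (prev + 1) bs prev (idx ++ [some (bs.length + 0)]) true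
          (by simp [hlen]) (by simp)
          (by
            have := pv_inv_open idx prev bs prev hlen hinv
            simpa using this)
        rw [show prev + 1 + m = prev + (m + 1) by omega] at hres
        simpa using hres

-- the final, usable form: B's lookup table against A's band list, from 0 to n
theorem pv_band_eq (p : Nat → Bool) (n : Nat)
    (bsF : List (Nat × Nat))
    (hbsF : bsF = (let stA := ((List.range n).filter p).foldl (fun (s : List (Nat × Nat) × Nat) sr =>
        (if s.2 < sr then s.1 ++ [(s.2, sr - 1)] else s.1, sr + 1)) ([], 0)
      if stA.2 < n then stA.1 ++ [(stA.2, n - 1)] else stA.1)) :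
    (bandIndexB n p).2 = bsF.length ∧
    ∀ b, pvBandFilt (bandIndexB n p).1 n b =
        if b < bsF.length then
          List.range' ((bsF.getD b (0,0)).1) ((bsF.getD b (0,0)).2 + 1 - (bsF.getD b (0,0)).1)
        else [] := by
  subst hbsF
  unfold bandIndexB
  have h := pv_band_aux p n 0 [] 0 [] false rfl (by simp)
    (by intro b; simp [pvBandFilt])
  rw [← List.range_eq_range'] at h
  simpa using h

theorem pv_flatMap_ite {α β : Type} (l : List α) (q : α → Bool) (g : α → List β) :
    l.flatMap (fun a => if q a then g a else []) = (l.filter q).flatMap g := by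
  induction l with
  | nil => rfl
  | cons x t ih => by_cases h : q x <;> simp [h, ih]

theorem pv_foldl_filterMap {α β γ : Type} (l : List α) (h : α → Option β) (f : γ → β → γ) :
    ∀ (d : γ), (l.filterMap h).foldl f d
      = l.foldl (fun d a => match h a with | some b => f d b | none => d) d := by
  induction l with
  | nil => intro d; rfl
  | cons x t ih =>
    intro d
    cases hx : h x <;> simp [hx, ih]

-- A's nested append loop over a panel's rectangle, as a flatMap of filtered rows
theorem pv_colors_flat (val : Nat → Nat → Int) (sep : Int) (rl cl : List Nat) :
    rl.foldl (fun cs r => cl.foldl (fun cs c =>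
        if val r c != sep then cs ++ [val r c] else cs) cs) []
      = rl.flatMap (fun r => (cl.filter (fun c => val r c != sep)).map (val r)) := by
  rw [PySem.List.foldl_congr_mem rl _
      (fun cs r => cs ++ (cl.filter (fun c => val r c != sep)).map (val r)) []
      (fun cs r _ => PySem.List.foldl_append_if (fun c => val r c != sep) (val r) cl cs),
    PySem.List.foldl_append_eq_flatMap]
  rfl

-- the (key, value) stream of B's single row-major pass
def pvStream (rl cl : List Nat) (rowOf colOf : Nat → Option Nat) (val : Nat → Nat → Int)
    (sep : Int) : List ((Nat × Nat) × Int) :=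
  rl.flatMap (fun r =>
    match rowOf r with
    | none => []
    | some i => cl.filterMap (fun c =>
        match colOf c with
        | some j => if val r c != sep then some ((i, j), val r c) else none
        | none => none))

-- B's nested pass with skips = one modify-append fold over the stream
theorem pv_pass_eq (rl cl : List Nat) (rowOf colOf : Nat → Option Nat)
    (val : Nat → Nat → Int) (sep : Int) (d0 : PySem.Dict (Nat × Nat) (List Int)) :
    rl.foldl (fun d r =>
      match rowOf r with
      | none => d
      | some i => cl.foldl (fun d c =>
          match colOf c with
          | some j => if val r c != sep then d.modify (i, j) [] (fun l => l ++ [val r c]) else d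
          | none => d) d) d0
    = (pvStream rl cl rowOf colOf val sep).foldl
        (fun d p => d.modify p.1 [] (fun l => l ++ [p.2])) d0 := by
  unfold pvStream
  rw [List.foldl_flatMap]
  apply PySem.List.foldl_congr_mem
  intro d r _
  cases hrow : rowOf r with
  | none => rfl
  | some i =>
    rw [pv_foldl_filterMap]
    apply PySem.List.foldl_congr_mem
    intro d' c _
    cases hcol : colOf c with
    | none => rfl
    | some j =>
      by_cases hv : val r c != sep <;> simp [hv]

-- projection of the stream at one panel key = that panel's color list in row-major order
theorem pv_proj (rl cl : List Nat) (rowOf colOf : Nat → Option Nat)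
    (val : Nat → Nat → Int) (sep : Int) (i j : Nat) :
    ((pvStream rl cl rowOf colOf val sep).filter (fun q => q.1 == (i, j))).map (fun q => q.2)
      = (rl.filter (fun r => rowOf r == some i)).flatMap (fun r =>
          ((cl.filter (fun c => colOf c == some j)).filter (fun c => val r c != sep)).map (val r)) := by
  unfold pvStream
  rw [List.filter_flatMap, List.map_flatMap, ← pv_flatMap_ite]
  congr 1
  funext r
  cases hrow : rowOf r with
  | none => simp
  | some i' =>
    rw [List.filter_filterMap, List.map_filterMap]
    by_cases hi : i' = i
    · rw [if_pos (by simp [hi])]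
      rw [← pv_filterMap_ite, List.filterMap_filter]
      apply List.filterMap_congr
      intro c _
      cases hcol : colOf c with
      | none => simp
      | some j' =>
        by_cases hj : j' = j
        · by_cases hv : val r c != sep <;> simp [hv, Option.filter, hi, hj]
        · by_cases hv : val r c != sep <;> simp [hv, Option.filter, hj]
    · rw [if_neg (by simp [hi])]
      rw [show ([] : List Int) = cl.filterMap (fun _ => (none : Option Int)) from
        (List.filterMap_none cl).symm]
      apply List.filterMap_congr
      intro c _
      cases hcol : colOf c with
      | none => simp
      | some j' =>
        by_cases hv : val r c != sep <;> simp [hv, Option.filter, hi]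

-- B's bucket for a panel key, from the single pass
theorem pv_panels_getD (rl cl : List Nat) (rowOf colOf : Nat → Option Nat)
    (val : Nat → Nat → Int) (sep : Int) (i j : Nat) :
    (rl.foldl (fun d r =>
      match rowOf r with
      | none => d
      | some i => cl.foldl (fun d c =>
          match colOf c with
          | some j => if val r c != sep then d.modify (i, j) [] (fun l => l ++ [val r c]) else d
          | none => d) d) PySem.Dict.empty).getD (i, j) []
    = (rl.filter (fun r => rowOf r == some i)).flatMap (fun r =>
        ((cl.filter (fun c => colOf c == some j)).filter (fun c => val r c != sep)).map (val r)) := by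
  rw [pv_pass_eq, PySem.Dict.getD_foldl_modify_append, ← pv_proj]
  simp [PySem.Dict.getD_empty]

-- a panel key is present in the dict iff its bucket is nonempty
theorem pv_panels_contains (rl cl : List Nat) (rowOf colOf : Nat → Option Nat)
    (val : Nat → Nat → Int) (sep : Int) (i j : Nat) :
    ((rl.foldl (fun d r =>
      match rowOf r with
      | none => d
      | some i => cl.foldl (fun d c =>
          match colOf c with
          | some j => if val r c != sep then d.modify (i, j) [] (fun l => l ++ [val r c]) else d
          | none => d) d) PySem.Dict.empty).contains (i, j) = true)
    ↔ (((pvStream rl cl rowOf colOf val sep).filter (fun q => q.1 == (i, j))).map (fun q => q.2) ≠ []) := by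
  rw [pv_pass_eq, PySem.Dict.contains_iff_mem_keys, PySem.Dict.keys_foldl_modify_key]
  simp only [PySem.Dict.keys_empty, PySem.Set.update_nil_left, PySem.Set.mem_ofList]
  simp only [List.mem_map, ne_eq, List.map_eq_nil_iff, List.filter_eq_nil_iff]
  constructor
  · rintro ⟨q, hq, he⟩ hall
    exact hall q hq (by simp [he])
  · intro h
    by_contra hno
    exact h (fun q hq hbe => hno ⟨q, hq, by simpa using hbe⟩)

-- A's append-in-a-double-loop output shape is a double map
theorem pv_out_shape {alpha beta gamma : Type} (l1 : List alpha) (l2 : List beta)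
    (P : alpha → beta → Prop) [inst : ∀ a b, Decidable (P a b)] (x y : alpha → beta → gamma) :
    List.foldl (fun output rb => output ++
        [List.foldl (fun row cb => if P rb cb then row ++ [x rb cb] else row ++ [y rb cb]) [] l2]) [] l1
    = l1.map (fun rb => l2.map (fun cb => if P rb cb then x rb cb else y rb cb)) := by
  have hin : ∀ rb, List.foldl (fun row cb => if P rb cb then row ++ [x rb cb] else row ++ [y rb cb]) [] l2
      = l2.map (fun cb => if P rb cb then x rb cb else y rb cb) := by
    intro rb
    have h1 : ∀ (acc : List gamma) cb, (if P rb cb then acc ++ [x rb cb] else acc ++ [y rb cb])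
        = acc ++ [if P rb cb then x rb cb else y rb cb] := by
      intro acc cb
      exact (apply_ite (fun t => acc ++ [t]) (P rb cb) (x rb cb) (y rb cb)).symm
    rw [PySem.List.foldl_congr_mem _ _ (fun row cb => row ++ [if P rb cb then x rb cb else y rb cb]) _
        (fun acc cb _ => h1 acc cb),
      PySem.List.foldl_append_singleton_eq_map, List.nil_append]
  calc List.foldl (fun output rb => output ++
        [List.foldl (fun row cb => if P rb cb then row ++ [x rb cb] else row ++ [y rb cb]) [] l2]) [] l1
      = List.foldl (fun output rb => output ++
        [l2.map (fun cb => if P rb cb then x rb cb else y rb cb)]) [] l1 := by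
        exact PySem.List.foldl_congr_mem _ _ _ _ (fun acc rb _ => by rw [hin rb])
    _ = _ := by rw [PySem.List.foldl_append_singleton_eq_map, List.nil_append]

-- ===== VERDICT (by name: the statement is the Claim_ definition above) =====
theorem transform_spec : Claim_equal_transform := by
  intro grid _ hpre
  unfold Spec_transform
  rcases hmax : PySem.List.max? (PySem.Dict.counter (grid.flatMap fun row => row)).items (fun p => p.2) with _ | sp
  · simp only [transform, transform_alt, hmax]
  · simp only [transform, transform_alt, hmax]
    set W := (grid.headD []).length with hW
    set H := grid.length with hH
    set sep := sp.1 with hsepd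
    set pR : Nat → Bool := fun r => (List.range W).all fun c => (grid.getD r []).getD c 0 == sep with hpR
    set pC : Nat → Bool := fun c => (List.range H).all fun r => (grid.getD r []).getD c 0 == sep with hpC
    set stR := List.foldl (fun (s : List (Nat × Nat) × Nat) sr =>
        (if s.2 < sr then s.1 ++ [(s.2, sr - 1)] else s.1, sr + 1)) ([], 0)
        (List.filter pR (List.range H)) with hstR
    set stC := List.foldl (fun (s : List (Nat × Nat) × Nat) sc =>
        (if s.2 < sc then s.1 ++ [(s.2, sc - 1)] else s.1, sc + 1)) ([], 0)
        (List.filter pC (List.range W)) with hstC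
    set rowBands := if stR.2 < H then stR.1 ++ [(stR.2, H - 1)] else stR.1 with hrB
    set colBands := if stC.2 < W then stC.1 ++ [(stC.2, W - 1)] else stC.1 with hcB
    obtain ⟨hcR, hfR⟩ := pv_band_eq pR H rowBands rfl
    obtain ⟨hcC, hfC⟩ := pv_band_eq pC W colBands rfl
    rw [pv_out_shape, hcR, hcC]
    apply List.ext_getElem (by simp)
    intro i hi1 hi2
    simp only [List.getElem_map, List.getElem_range]
    apply List.ext_getElem (by simp)
    intro j hj1 hj2
    simp only [List.getElem_map, List.getElem_range]
    have hiL : i < rowBands.length := by simpa using hi1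
    have hjL : j < colBands.length := by simpa using hj2
    have hrl := hfR i
    rw [if_pos hiL, List.getD_eq_getElem rowBands (0, 0) hiL] at hrl
    have hcl := hfC j
    rw [if_pos hjL, List.getD_eq_getElem colBands (0, 0) hjL] at hcl
    simp only [pvBandFilt] at hrl hcl
    rw [pv_colors_flat (fun r c => (grid.getD r []).getD c 0) sep]
    simp only [← hrl, ← hcl]
    rw [pv_panels_getD (List.range H) (List.range W)
        (fun r => (bandIndexB H pR).1.getD r none) (fun c => (bandIndexB W pC).1.getD c none)
        (fun r c => (grid.getD r []).getD c 0) sep i j]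
    have hctns := pv_panels_contains (List.range H) (List.range W)
        (fun r => (bandIndexB H pR).1.getD r none) (fun c => (bandIndexB W pC).1.getD c none)
        (fun r c => (grid.getD r []).getD c 0) sep i j
    rw [pv_proj] at hctns
    split_ifs with h1 h2 h2
    · rfl
    · exact absurd (hctns.mpr h1) h2
    · exact absurd (hctns.mp h2) h1
    · rfl
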